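-- pv_equiv track=rewrite | github.com/mcfletch/listener | listener/tokenizer.py | combine_ls
-- ===== SOURCE A (Python) =====
-- def combine_ls( name ):
--     """Combine all L-prefixed items..."""
--     result = []
--     for (category,chars) in name:
--         if (
--             category == 'Ll' and
--             result and
--             result[-1][0] == 'Lu'
--             and len(result[-1][1]) == 1
--         ):
--             result[-1] = ('L',result[-1][1]+chars)
--         else:
--             result.append( (category,chars) )
--     return result
-- ===== SOURCE B (Python) =====
-- def combine_ls(name):
--     """Combine all L-prefixed items (single-pass index loop with forward lookahead)."""
--     out = []
--     i = 0
--     n = len(name)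
--     while i < n:
--         category, chars = name[i]
--         if category == 'Lu' and len(chars) == 1 and i + 1 < n and name[i + 1][0] == 'Ll':
--             out.append(('L', chars + name[i + 1][1]))
--             i += 2
--         else:
--             out.append((category, chars))
--             i += 1
--     return out
-- ===== Notes on version B (the rewrite author's own statement) =====
-- stated objective: alternative
-- what changed: Replaces the append-then-mutate-last (lookback at result[-1]) loop with a forward-lookahead index loop that decides the merge from name[i] and name[i+1] and emits each output pair exactly once, never touching the result list again.
import Mathlib
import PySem

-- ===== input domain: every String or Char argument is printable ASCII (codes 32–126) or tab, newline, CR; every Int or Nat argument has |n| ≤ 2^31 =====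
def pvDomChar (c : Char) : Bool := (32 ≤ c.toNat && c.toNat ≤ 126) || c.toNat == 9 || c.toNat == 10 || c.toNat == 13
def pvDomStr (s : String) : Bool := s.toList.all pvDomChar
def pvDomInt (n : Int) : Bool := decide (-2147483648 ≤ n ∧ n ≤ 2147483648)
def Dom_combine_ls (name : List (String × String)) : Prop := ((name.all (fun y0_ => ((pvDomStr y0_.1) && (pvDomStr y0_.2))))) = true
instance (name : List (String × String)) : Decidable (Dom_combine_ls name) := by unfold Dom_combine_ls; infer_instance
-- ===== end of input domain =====

-- B replaces A's append-then-mutate-last (lookback at result[-1]) loop by a forward-lookahead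
-- pass that decides each merge from name[i] and name[i+1] and emits each output pair once (alternative decomposition, same cost).


-- ===== PORT A =====
-- Python str + str (exact: strings are their character lists)
def pvCat (a b : String) : String := String.ofList (a.toList ++ b.toList)

-- one iteration of A's for-loop body: result[-1] is PySem.List.pyGetD r (-1) (read only after the
-- nonemptiness conjunct, as in Python's short-circuit), result[-1] = … is dropLast ++ [·]
def stepA (r : List (String × String)) (x : String × String) : List (String × String) :=
  if x.1 = "Ll" ∧ r ≠ [] ∧ (PySem.List.pyGetD r (-1) ("", "")).1 = "Lu"
      ∧ PySem.Str.len (PySem.List.pyGetD r (-1) ("", "")).2 = 1 then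
    r.dropLast ++ [("L", pvCat (PySem.List.pyGetD r (-1) ("", "")).2 x.2)]
  else
    r ++ [x]

def combine_ls (name : List (String × String)) : List (String × String) :=
  name.foldl stepA []

-- ===== PORT B =====
-- the while-i loop of Source B: name[i] / name[i+1] are the first two elements of the unread suffix;
-- advancing i by 2 (merge) or 1 (copy) is consuming two or one elements
def altGo : List (String × String) → List (String × String)
  | [] => []
  | [x] => [x]
  | x :: y :: rest =>
    if x.1 = "Lu" ∧ PySem.Str.len x.2 = 1 ∧ y.1 = "Ll" then
      ("L", pvCat x.2 y.2) :: altGo rest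
    else
      x :: altGo (y :: rest)

def combine_ls_alt (name : List (String × String)) : List (String × String) :=
  altGo name

-- ===== PRECONDITION & SPEC =====
def Spec_combine_ls (name : List (String × String)) (out : List (String × String)) : Prop := out = combine_ls_alt name
instance (name : List (String × String)) (out : List (String × String)) : Decidable (Spec_combine_ls name out) := by unfold Spec_combine_ls; infer_instance

-- ===== CLAIM (what is proved, stated in full; the proofs are below) =====
def Claim_equal_combine_ls : Prop := ∀ (name : List (String × String)), Dom_combine_ls name → Spec_combine_ls name (combine_ls name)

-- ===== LEMMAS AND PROOFS =====

-- A's merge condition for the incoming element x against the accumulator r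
def mergeC (r : List (String × String)) (x : String × String) : Prop :=
  x.1 = "Ll" ∧ r ≠ [] ∧ (PySem.List.pyGetD r (-1) ("", "")).1 = "Lu"
    ∧ PySem.Str.len (PySem.List.pyGetD r (-1) ("", "")).2 = 1

theorem stepA_of_not_merge (r : List (String × String)) (x : String × String)
    (h : ¬ mergeC r x) : stepA r x = r ++ [x] := by
  simp only [stepA, mergeC] at *
  rw [if_neg h]

theorem stepA_merge (r : List (String × String)) (x y : String × String)
    (hx : x.1 = "Lu") (hlen : PySem.Str.len x.2 = 1) (hy : y.1 = "Ll") :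
    stepA (r ++ [x]) y = r ++ [("L", pvCat x.2 y.2)] := by
  simp only [stepA, PySem.List.pyGetD_neg_one_append_singleton]
  rw [if_pos ⟨hy, by simp, hx, hlen⟩]
  simp

-- the loop invariant: as long as the next element cannot merge into the accumulator,
-- A's fold from r equals r ++ (B's lookahead pass over the remaining input)
theorem foldl_stepA_eq (l : List (String × String)) :
    ∀ r : List (String × String), (∀ y, l.head? = some y → ¬ mergeC r y) →
      List.foldl stepA r l = r ++ altGo l := by
  induction l using altGo.induct with
  | case1 => intro r _; simp [altGo]
  | case2 x =>
    intro r hb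
    have hx : ¬ mergeC r x := hb x (by simp)
    simp [altGo, List.foldl, stepA_of_not_merge r x hx]
  | case3 x y rest hcond ih =>
    intro r hb
    obtain ⟨hxu, hxlen, hyl⟩ := hcond
    have hx : ¬ mergeC r x := hb x (by simp)
    have hstep2 : stepA (r ++ [x]) y = r ++ [("L", pvCat x.2 y.2)] :=
      stepA_merge r x y hxu hxlen hyl
    have hnext : ∀ z, rest.head? = some z →
        ¬ mergeC (r ++ [("L", pvCat x.2 y.2)]) z := by
      intro z _ hm
      have : (PySem.List.pyGetD (r ++ [("L", pvCat x.2 y.2)]) (-1) ("", "")).1 = "Lu" :=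
        hm.2.2.1
      rw [PySem.List.pyGetD_neg_one_append_singleton] at this
      simp at this
    calc List.foldl stepA r (x :: y :: rest)
        = List.foldl stepA (stepA (stepA r x) y) rest := rfl
      _ = List.foldl stepA (r ++ [("L", pvCat x.2 y.2)]) rest := by
            rw [stepA_of_not_merge r x hx, hstep2]
      _ = r ++ [("L", pvCat x.2 y.2)] ++ altGo rest := ih _ hnext
      _ = r ++ altGo (x :: y :: rest) := by
            show _ = r ++ altGo (x :: y :: rest)
            have e : altGo (x :: y :: rest) =
                if x.1 = "Lu" ∧ PySem.Str.len x.2 = 1 ∧ y.1 = "Ll" then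
                  ("L", pvCat x.2 y.2) :: altGo rest
                else x :: altGo (y :: rest) := by rw [altGo.eq_def]
            rw [e, if_pos ⟨hxu, hxlen, hyl⟩]
            simp
  | case4 x y rest hcond ih =>
    intro r hb
    have hx : ¬ mergeC r x := hb x (by simp)
    have hnext : ∀ z, (y :: rest).head? = some z → ¬ mergeC (r ++ [x]) z := by
      intro z hz hm
      obtain rfl : y = z := by simpa using hz
      obtain ⟨hzl, -, hlu, hlen⟩ := hm
      rw [PySem.List.pyGetD_neg_one_append_singleton] at hlu hlen
      exact hcond ⟨hlu, hlen, hzl⟩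
    calc List.foldl stepA r (x :: y :: rest)
        = List.foldl stepA (stepA r x) (y :: rest) := rfl
      _ = List.foldl stepA (r ++ [x]) (y :: rest) := by rw [stepA_of_not_merge r x hx]
      _ = r ++ [x] ++ altGo (y :: rest) := ih _ hnext
      _ = r ++ altGo (x :: y :: rest) := by
            have e : altGo (x :: y :: rest) =
                if x.1 = "Lu" ∧ PySem.Str.len x.2 = 1 ∧ y.1 = "Ll" then
                  ("L", pvCat x.2 y.2) :: altGo rest
                else x :: altGo (y :: rest) := by rw [altGo.eq_def]
            rw [e, if_neg hcond]
            simp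

-- ===== VERDICT (by name: the statement is the Claim_ definition above) =====
theorem combine_ls_spec : Claim_equal_combine_ls := by
  intro name _
  unfold Spec_combine_ls combine_ls combine_ls_alt
  have := foldl_stepA_eq name [] (by intro y _ hm; exact hm.2.1 rfl)
  simpa using this
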